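-- pv_equiv track=rewrite | github.com/Sujith-sunny/audio-to-speech-pipeline | packages/ekstep_data_pipelines/data_marker/data_filter.py | by_duration
-- ===== SOURCE A (Python) =====
-- def by_duration(utterances, total_duration):
--     duration = 0
--     filtered_utterances = []
--     for utterance in utterances:
--         duration = duration + utterance[2]
--         filtered_utterances.append(utterance)
--         if duration >= total_duration:
--             break
--     return filtered_utterances
-- ===== SOURCE B (Python) =====
-- def by_duration(utterances, total_duration):
--     total = 0
--     cums = [total := total + u[2] for u in utterances]
--     cut = next((i + 1 for i, c in enumerate(cums) if c >= total_duration),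
--                len(utterances))
--     return utterances[:cut]
-- ===== Notes on version B (the rewrite author's own statement) =====
-- stated objective: alternative
-- what changed: Replaces the interleaved accumulate-append-break loop with a precomputed prefix-sum table, a separate search for the first index reaching the threshold, and a single slice.
import Mathlib
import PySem

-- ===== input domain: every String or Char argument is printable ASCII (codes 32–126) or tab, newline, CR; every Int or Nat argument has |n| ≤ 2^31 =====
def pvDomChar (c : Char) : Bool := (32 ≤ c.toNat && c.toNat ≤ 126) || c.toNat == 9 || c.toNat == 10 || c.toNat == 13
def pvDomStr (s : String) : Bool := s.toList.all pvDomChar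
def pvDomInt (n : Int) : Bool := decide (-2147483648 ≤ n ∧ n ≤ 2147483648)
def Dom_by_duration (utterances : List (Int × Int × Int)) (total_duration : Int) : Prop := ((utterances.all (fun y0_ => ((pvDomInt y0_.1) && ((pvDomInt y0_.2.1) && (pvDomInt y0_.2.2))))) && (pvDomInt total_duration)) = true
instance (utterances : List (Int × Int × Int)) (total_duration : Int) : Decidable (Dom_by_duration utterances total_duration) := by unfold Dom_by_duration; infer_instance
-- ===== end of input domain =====

-- B replaces A's interleaved accumulate-and-break loop by a prefix-sum table, a first-index search, and one slice (alternative decomposition, same cost).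


-- ===== PORT A =====
-- the for-loop with break: recursion over the list carrying (duration, filtered_utterances)
def byDurationGoA (total_duration : Int) (us : List (Int × Int × Int)) (duration : Int)
    (filtered : List (Int × Int × Int)) : List (Int × Int × Int) :=
  match us with
  | [] => filtered
  | u :: rest =>
    let duration' := duration + u.2.2
    let filtered' := filtered ++ [u]
    if duration' ≥ total_duration then filtered'
    else byDurationGoA total_duration rest duration' filtered'

def by_duration (utterances : List (Int × Int × Int)) (total_duration : Int) : List (Int × Int × Int) :=
  byDurationGoA total_duration utterances 0 []

-- ===== PORT B =====
-- the list comprehension with the walrus accumulator: a foldl carrying (total, cums)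
def byDurationCums (utterances : List (Int × Int × Int)) : List Int :=
  (utterances.foldl (fun (acc : Int × List Int) u =>
    (acc.1 + u.2.2, acc.2 ++ [acc.1 + u.2.2])) (0, [])).2

-- next((i+1 for i, c in enumerate(cums) if c >= t), default): first satisfying index, as Option
def byDurationFirstCut (cums : List Int) (t : Int) (i : Nat) : Option Nat :=
  match cums with
  | [] => none
  | c :: rest => if c ≥ t then some (i + 1) else byDurationFirstCut rest t (i + 1)

def by_duration_alt (utterances : List (Int × Int × Int)) (total_duration : Int) : List (Int × Int × Int) :=
  let cums := byDurationCums utterances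
  let cut := (byDurationFirstCut cums total_duration 0).getD utterances.length
  -- utterances[:cut] with cut a nonnegative in-range Nat is List.take
  utterances.take cut

-- ===== PRECONDITION & SPEC =====
def Spec_by_duration (utterances : List (Int × Int × Int)) (total_duration : Int) (out : List (Int × Int × Int)) : Prop := out = by_duration_alt utterances total_duration
instance (utterances : List (Int × Int × Int)) (total_duration : Int) (out : List (Int × Int × Int)) : Decidable (Spec_by_duration utterances total_duration out) := by unfold Spec_by_duration; infer_instance

-- ===== CLAIM (what is proved, stated in full; the proofs are below) =====
def Claim_equal_by_duration : Prop := ∀ (utterances : List (Int × Int × Int)) (total_duration : Int), Dom_by_duration utterances total_duration → Spec_by_duration utterances total_duration (by_duration utterances total_duration)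

-- ===== LEMMAS AND PROOFS =====

-- prefix sums starting at s, as a simple recursion
def pvCumsFrom (s : Int) (us : List (Int × Int × Int)) : List Int :=
  match us with
  | [] => []
  | u :: rest => (s + u.2.2) :: pvCumsFrom (s + u.2.2) rest

theorem pvCums_fold (us : List (Int × Int × Int)) :
    ∀ (s : Int) (l : List Int),
      (us.foldl (fun (acc : Int × List Int) u =>
        (acc.1 + u.2.2, acc.2 ++ [acc.1 + u.2.2])) (s, l)).2 = l ++ pvCumsFrom s us := by
  induction us with
  | nil => intro s l; simp [pvCumsFrom]
  | cons u rest ih =>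
    intro s l
    simp only [List.foldl, pvCumsFrom]
    rw [ih]
    simp

-- the first-cut search is insensitive to the start index up to a shift
theorem pvFirstCut_shift (cums : List Int) (t : Int) :
    ∀ i : Nat, byDurationFirstCut cums t i = (byDurationFirstCut cums t 0).map (· + i) := by
  induction cums with
  | nil => intro i; simp [byDurationFirstCut]
  | cons c rest ih =>
    intro i
    simp only [byDurationFirstCut]
    split
    · simp [Nat.add_comm]
    · rw [ih (i + 1), ih 1]
      cases byDurationFirstCut rest t 0 <;> simp <;> omega

theorem pvGoA_eq (t : Int) (us : List (Int × Int × Int)) :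
    ∀ (s : Int) (acc : List (Int × Int × Int)),
      byDurationGoA t us s acc =
        acc ++ us.take ((byDurationFirstCut (pvCumsFrom s us) t 0).getD us.length) := by
  induction us with
  | nil => intro s acc; simp [byDurationGoA, byDurationFirstCut]
  | cons u rest ih =>
    intro s acc
    simp only [byDurationGoA, pvCumsFrom, byDurationFirstCut]
    split
    · simp
    · rw [ih (s + u.2.2) (acc ++ [u]), pvFirstCut_shift (pvCumsFrom (s + u.2.2) rest) t 1]
      cases h : byDurationFirstCut (pvCumsFrom (s + u.2.2) rest) t 0 <;> simp

-- ===== VERDICT (by name: the statement is the Claim_ definition above) =====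
theorem by_duration_spec : Claim_equal_by_duration := by
  intro utterances total_duration _
  unfold Spec_by_duration by_duration by_duration_alt byDurationCums
  rw [pvCums_fold utterances 0 []]
  simpa using pvGoA_eq total_duration utterances 0 []
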